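-- pv_equiv track=rewrite | github.com/Bamkoff/Zaawansowane-algorytmy-kombinatoryczne | zaj 3/zad 2.py | generate_tree_from_prufer_code
-- ===== SOURCE A (Python) =====
-- def sort_edges(edges, edge):
--     if edge[0] > edge[1]:
--         temp = edge[0]
--         edge[0] = edge[1]
--         edge[1] = temp
--     index = 0
--     for i in edges:
--         if edge[0] < i[0]:
--             break
--         elif edge[0] == i[0] and edge[1] < i[1]:
--             break
--         else:
--             index += 1
--     edges.insert(index, edge)
--
-- def generate_tree_from_prufer_code(code):
--     L1 = code[:]
--     L2 = []
--     edges = []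
--     nodes = set()
--     for i in range(len(code)+2):
--         L2.append(i+1)
--         nodes.add(i+1)
--     for k in range(len(L1)):
--         current_node = L2[0]
--         counter = 1
--         while L1.count(current_node) > 0:
--             current_node = L2[counter]
--             counter += 1
--         sort_edges(edges, [code[k], current_node])
--         L1.remove(code[k])
--         L2.remove(current_node)
--     sort_edges(edges, [L2[0], L2[1]])
--     return edges
-- ===== SOURCE B (Python) =====
-- def _next_leaf(cnt, ptr):
--     while cnt.get(ptr, 0) > 0:
--         ptr += 1
--     return ptr
--
--
-- def generate_tree_from_prufer_code(code):
--     n = len(code) + 2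
--     cnt = {}
--     for v in code:
--         cnt[v] = cnt.get(v, 0) + 1
--     edges = []
--     ptr = 1
--     pending = None
--     for v in code:
--         if pending is None:
--             ptr = _next_leaf(cnt, ptr)
--             leaf = ptr
--             ptr += 1
--         else:
--             leaf = pending
--         edges.append([v, leaf] if v < leaf else [leaf, v])
--         cnt[v] -= 1
--         pending = v if cnt[v] == 0 and 1 <= v < ptr else None
--     if pending is None:
--         ptr = _next_leaf(cnt, ptr)
--         u = ptr
--         ptr += 1
--     else:
--         u = pending
--     ptr = _next_leaf(cnt, ptr)
--     edges.append([u, ptr])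
--     return sorted(edges)
-- ===== Notes on version B (the rewrite author's own statement) =====
-- stated objective: faster
-- what changed: Replaces the quadratic scan (L1.count over the remaining code for every candidate, list.remove on both lists, and insertion-sorting every edge into place) by the linear-time pointer decoding: a count dictionary built once, a monotone pointer that finds the smallest unattached leaf, a one-element 'pending' slot for a node whose count just dropped to zero, and one final sort of the edge list.
import Mathlib
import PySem

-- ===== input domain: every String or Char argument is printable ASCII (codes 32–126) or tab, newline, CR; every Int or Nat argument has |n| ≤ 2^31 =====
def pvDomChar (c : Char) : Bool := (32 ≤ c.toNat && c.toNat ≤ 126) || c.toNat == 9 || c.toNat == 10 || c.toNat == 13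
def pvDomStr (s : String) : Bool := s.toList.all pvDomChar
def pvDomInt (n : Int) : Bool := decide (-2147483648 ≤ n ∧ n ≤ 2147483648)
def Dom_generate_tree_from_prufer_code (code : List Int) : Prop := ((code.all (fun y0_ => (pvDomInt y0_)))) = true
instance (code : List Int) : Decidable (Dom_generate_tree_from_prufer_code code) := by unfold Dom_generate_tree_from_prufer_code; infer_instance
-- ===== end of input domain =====

-- B replaces A's quadratic scan/remove/insertion-sort decoding of a Prüfer code by the
-- linear pointer algorithm (count dictionary + monotone leaf pointer + pending slot) with one
-- final sort; a timing run measured B faster.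

-- ===== PORT A =====
-- Every edge A builds is a two-element list [x, y]; Python would raise IndexError on a
-- shorter list, which never occurs here, so edge[0]/edge[1] are read with default 0.
def pvE0 (e : List Int) : Int := PySem.List.pyGetD e 0 0
def pvE1 (e : List Int) : Int := PySem.List.pyGetD e 1 0

-- the 'for i in edges: … else index += 1' scan of sort_edges
def pvSortEdgesIndex (e0 e1 : Int) : List (List Int) → Nat
  | [] => 0
  | i :: rest =>
    if e0 < pvE0 i then 0
    else if e0 = pvE0 i ∧ e1 < pvE1 i then 0
    else pvSortEdgesIndex e0 e1 rest + 1

def sort_edges (edges : List (List Int)) (edge : List Int) : List (List Int) :=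
  let e := if pvE0 edge > pvE1 edge then [pvE1 edge, pvE0 edge] else edge
  PySem.List.insert edges ((pvSortEdgesIndex (pvE0 e) (pvE1 e) edges : Nat) : Int) e

-- 'current_node = L2[0]; counter = 1; while L1.count(current_node) > 0: current_node = L2[counter]; …'
-- (rest = the part of L2 after current; the [] case is Python's IndexError, never reached)
def pvWhileFind (L1 : List Int) : List Int → Int → Int
  | rest, current =>
    if PySem.List.count L1 current > 0 then
      match rest with
      | [] => 0
      | c :: rest' => pvWhileFind L1 rest' c
    else current

-- 'for k in range(len(L1)): …' — c runs over code's elements (c = code[k])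
def pvMainLoop : List Int → List Int × List Int × List (List Int) → List Int × List Int × List (List Int)
  | [], st => st
  | c :: cs, (L1, L2, edges) =>
    let current := pvWhileFind L1 (L2.drop 1) (PySem.List.pyGetD L2 0 0)
    let edges' := sort_edges edges [c, current]
    let L1' := (PySem.List.remove? L1 c).getD L1
    let L2' := (PySem.List.remove? L2 current).getD L2
    pvMainLoop cs (L1', L2', edges')

-- the 'nodes' set of the Python is built but never read; it is omitted.
def generate_tree_from_prufer_code (code : List Int) : List (List Int) :=
  let L1 := code
  let L2 := (PySem.List.pyRange 0 ((code.length : Int) + 2) 1).foldl (fun l i => l ++ [i + 1]) []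
  let st := pvMainLoop code (L1, L2, [])
  sort_edges st.2.2 [PySem.List.pyGetD st.2.1 0 0, PySem.List.pyGetD st.2.1 1 0]

-- ===== PORT B =====
-- '_next_leaf': 'while cnt.get(ptr, 0) > 0: ptr += 1'; fuel only makes the while total,
-- it is never exhausted on reachable states.
def pvNextLeaf (cnt : PySem.Dict Int Int) (ptr : Int) : Nat → Int
  | 0 => ptr
  | fuel + 1 => if PySem.Dict.getD cnt ptr 0 > 0 then pvNextLeaf cnt (ptr + 1) fuel else ptr

-- the 'for v in code:' loop of Source B
def pvAltLoop (fuel : Nat) :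
    List Int → PySem.Dict Int Int → Int → Option Int → List (List Int) →
    PySem.Dict Int Int × Int × Option Int × List (List Int)
  | [], cnt, ptr, pending, edges => (cnt, ptr, pending, edges)
  | v :: vs, cnt, ptr, pending, edges =>
    let lp : Int × Int :=
      match pending with
      | none => (pvNextLeaf cnt ptr fuel, pvNextLeaf cnt ptr fuel + 1)
      | some l => (l, ptr)
    let leaf := lp.1
    let ptr' := lp.2
    let edges' := edges ++ [if v < leaf then [v, leaf] else [leaf, v]]
    let cnt' := PySem.Dict.insert cnt v (PySem.Dict.getD cnt v 0 - 1)
    let pending' := if PySem.Dict.getD cnt' v 0 = 0 ∧ 1 ≤ v ∧ v < ptr' then some v else none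
    pvAltLoop fuel vs cnt' ptr' pending' edges'

def generate_tree_from_prufer_code_alt (code : List Int) : List (List Int) :=
  let fuel := code.length + 2
  let cnt := code.foldl (fun d v => PySem.Dict.insert d v (PySem.Dict.getD d v 0 + 1)) ∅
  match pvAltLoop fuel code cnt 1 none [] with
  | (cnt1, ptr1, pending1, edges1) =>
    let up : Int × Int :=
      match pending1 with
      | none => (pvNextLeaf cnt1 ptr1 fuel, pvNextLeaf cnt1 ptr1 fuel + 1)
      | some l => (l, ptr1)
    let w := pvNextLeaf cnt1 up.2 fuel
    PySem.List.sorted (edges1 ++ [[up.1, w]]) (fun e => e)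

-- ===== PRECONDITION & SPEC =====
def Spec_generate_tree_from_prufer_code (code : List Int) (out : List (List Int)) : Prop := out = generate_tree_from_prufer_code_alt code
instance (code : List Int) (out : List (List Int)) : Decidable (Spec_generate_tree_from_prufer_code code out) := by unfold Spec_generate_tree_from_prufer_code; infer_instance

-- ===== CLAIM (what is proved, stated in full; the proofs are below) =====
def Claim_equal_generate_tree_from_prufer_code : Prop := ∀ (code : List Int), Dom_generate_tree_from_prufer_code code → Spec_generate_tree_from_prufer_code code (generate_tree_from_prufer_code code)

-- ===== LEMMAS AND PROOFS =====
lemma pvE0_pair (a b : Int) : pvE0 [a,b] = a := by simp [pvE0, PySem.List.pyGetD_zero_cons]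
lemma pvE1_pair (a b : Int) : pvE1 [a,b] = b := by
  have := PySem.List.pyGetD_ofNat (n := 1) (xs := [a,b]) (d := 0) (by norm_num)
  simpa [pvE1] using this
lemma pvSortEdges_swap (es : List (List Int)) (c cur : Int) :
    sort_edges es [c, cur] = sort_edges es (if c > cur then [cur, c] else [c, cur]) := by
  by_cases h : c > cur
  · simp [sort_edges, pvE0_pair, pvE1_pair, h, not_lt.mpr (le_of_lt h)]
  · simp [sort_edges, pvE0_pair, pvE1_pair, h]
def pvStepsA : List Int → List Int → List Int → List Int × List Int × List (List Int)
  | [], L1, L2 => (L1, L2, [])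
  | c :: cs, L1, L2 =>
    let cur := pvWhileFind L1 (L2.drop 1) (PySem.List.pyGetD L2 0 0)
    let st := pvStepsA cs ((PySem.List.remove? L1 c).getD L1) ((PySem.List.remove? L2 cur).getD L2)
    (st.1, st.2.1, (if c > cur then [cur, c] else [c, cur]) :: st.2.2)

def pvStepsB (fuel : Nat) : List Int → PySem.Dict Int Int → Int → Option Int →
    PySem.Dict Int Int × Int × Option Int × List (List Int)
  | [], cnt, ptr, pending => (cnt, ptr, pending, [])
  | v :: vs, cnt, ptr, pending =>
    let lp : Int × Int :=
      match pending with
      | none => (pvNextLeaf cnt ptr fuel, pvNextLeaf cnt ptr fuel + 1)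
      | some l => (l, ptr)
    let cnt' := PySem.Dict.insert cnt v (PySem.Dict.getD cnt v 0 - 1)
    let pending' := if PySem.Dict.getD cnt' v 0 = 0 ∧ 1 ≤ v ∧ v < lp.2 then some v else none
    let st := pvStepsB fuel vs cnt' lp.2 pending'
    (st.1, st.2.1, st.2.2.1, (if v < lp.1 then [v, lp.1] else [lp.1, v]) :: st.2.2.2)

lemma pvMainLoop_eq_stepsA (cs : List Int) : ∀ L1 L2 es,
    pvMainLoop cs (L1, L2, es) =
      ((pvStepsA cs L1 L2).1, (pvStepsA cs L1 L2).2.1,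
        List.foldl sort_edges es (pvStepsA cs L1 L2).2.2) := by
  induction cs with
  | nil => intro L1 L2 es; simp [pvMainLoop, pvStepsA]
  | cons c cs ih =>
    intro L1 L2 es
    simp only [pvMainLoop, pvStepsA, ih, List.foldl_cons, pvSortEdges_swap]

lemma pvAltLoop_eq_stepsB (fuel : Nat) (cs : List Int) : ∀ cnt ptr pending es,
    pvAltLoop fuel cs cnt ptr pending es =
      ((pvStepsB fuel cs cnt ptr pending).1, (pvStepsB fuel cs cnt ptr pending).2.1,
        (pvStepsB fuel cs cnt ptr pending).2.2.1,
        es ++ (pvStepsB fuel cs cnt ptr pending).2.2.2) := by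
  induction cs with
  | nil => intro cnt ptr pending es; simp [pvAltLoop, pvStepsB]
  | cons v vs ih =>
    intro cnt ptr pending es
    simp only [pvAltLoop, pvStepsB, ih]
    simp

lemma pvNextLeaf_min (cnt : PySem.Dict Int Int) (y : Int) : ∀ (fuel : Nat) (ptr : Int),
    ptr ≤ y → y < ptr + fuel → ¬ PySem.Dict.getD cnt y 0 > 0 →
    (∀ z, ptr ≤ z → z < y → PySem.Dict.getD cnt z 0 > 0) →
    pvNextLeaf cnt ptr fuel = y := by
  intro fuel
  induction fuel with
  | zero => intro ptr h1 h2 _ _; omega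
  | succ fuel ih =>
    intro ptr h1 h2 hy hmin
    rcases eq_or_lt_of_le h1 with rfl | hlt
    · simp [pvNextLeaf, hy]
    · have hp : PySem.Dict.getD cnt ptr 0 > 0 := hmin ptr le_rfl hlt
      simp only [pvNextLeaf, if_pos hp]
      exact ih (ptr + 1) (by omega) (by omega) hy (fun z hz hzy => hmin z (by omega) hzy)

lemma pvWhileFind_min (L1 : List Int) : ∀ (rest : List Int) (cur z : Int),
    (cur :: rest).Pairwise (· < ·) → z ∈ cur :: rest → PySem.List.count L1 z = 0 →
    (∀ y ∈ cur :: rest, y < z → 0 < PySem.List.count L1 y) →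
    pvWhileFind L1 rest cur = z := by
  intro rest
  induction rest with
  | nil =>
    intro cur z _ hz hzc _
    simp at hz; subst hz
    simp only [pvWhileFind, hzc]; simp
  | cons c rest' ih =>
    intro cur z hpw hz hzc hmin
    rw [List.mem_cons] at hz
    by_cases hcur : PySem.List.count L1 cur > 0
    · have hne : cur ≠ z := fun h => by rw [h] at hcur; omega
      have hzr : z ∈ c :: rest' := by tauto
      simp only [pvWhileFind, if_pos hcur]
      exact ih c z hpw.of_cons hzr hzc (fun y hy hyz => hmin y (List.mem_cons_of_mem _ hy) hyz)
    · simp only [pvWhileFind, if_neg hcur]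
      by_contra hne
      have hzz : z ∈ c :: rest' := by tauto
      have hlt : cur < z := (List.pairwise_cons.mp hpw).1 z hzz
      have := hmin cur (by simp) hlt
      omega
lemma pv_lex2 (a b c d : Int) : (([a, b] : List Int) < [c, d]) ↔ (a < c ∨ (a = c ∧ b < d)) := by
  simp [List.cons_lt_cons_iff]

def pvIsEdge (e : List Int) : Prop := ∃ a b : Int, e = [a, b] ∧ a ≤ b

lemma pvSortEdgesIndex_le (e0 e1 : Int) : ∀ edges, pvSortEdgesIndex e0 e1 edges ≤ edges.length := by
  intro edges
  induction edges with
  | nil => simp [pvSortEdgesIndex]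
  | cons i rest ih =>
    simp only [pvSortEdgesIndex, List.length_cons]
    split_ifs <;> omega

lemma pvInsertAt_insertBy (a b : Int) : ∀ (edges : List (List Int)), (∀ e ∈ edges, pvIsEdge e) →
    List.take (pvSortEdgesIndex a b edges) edges ++ [a, b] :: List.drop (pvSortEdgesIndex a b edges) edges
      = PySem.List.insertBy (fun p q => decide (p < q)) [a, b] edges := by
  intro edges
  induction edges with
  | nil => simp [pvSortEdgesIndex, PySem.List.insertBy]
  | cons i rest ih =>
    intro hall
    obtain ⟨c, d, rfl, hcd⟩ := hall _ (List.mem_cons_self)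
    by_cases h1 : a < c
    · have hbt : (([a,b] : List Int) < [c,d]) := by rw [pv_lex2]; omega
      have hidx : pvSortEdgesIndex a b ([c,d] :: rest) = 0 := by
        simp [pvSortEdgesIndex, pvE0_pair, h1]
      simp [hidx, PySem.List.insertBy, hbt]
    · by_cases h2 : a = c ∧ b < d
      · have hbt : (([a,b] : List Int) < [c,d]) := by rw [pv_lex2]; tauto
        have hidx : pvSortEdgesIndex a b ([c,d] :: rest) = 0 := by
          simp [pvSortEdgesIndex, pvE0_pair, pvE1_pair, h2]
        simp [hidx, PySem.List.insertBy, hbt]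
      · have hlt : ¬ (([a,b] : List Int) < [c,d]) := by rw [pv_lex2]; tauto
        simp only [pvSortEdgesIndex, pvE0_pair, pvE1_pair, if_neg h1, if_neg h2,
          PySem.List.insertBy, decide_eq_true_eq, if_neg hlt, List.take_succ_cons,
          List.drop_succ_cons, List.cons_append, List.cons.injEq, true_and]
        exact ih (fun e he => hall e (List.mem_cons_of_mem _ he))

lemma pvSortEdges_insertBy (edges : List (List Int)) (a b : Int) (hab : a ≤ b)
    (h : ∀ e ∈ edges, pvIsEdge e) :
    sort_edges edges [a, b] =
      PySem.List.insertBy (fun p q => decide (p < q)) [a, b] edges := by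
  simp only [sort_edges, pvE0_pair, pvE1_pair, if_neg (show ¬ a > b by omega)]
  rw [PySem.List.insert_natCast _ _ _ (pvSortEdgesIndex_le a b edges)]
  exact pvInsertAt_insertBy a b edges h

lemma pvFoldl_sortEdges (raw : List (List Int)) : ∀ acc,
    (∀ e ∈ acc, pvIsEdge e) → (∀ e ∈ raw, pvIsEdge e) →
    List.foldl sort_edges acc raw =
      List.foldl (fun es e => PySem.List.insertBy (fun p q => decide (p < q)) e es) acc raw := by
  induction raw with
  | nil => intro acc _ _; rfl
  | cons r raw' ih =>
    intro acc hacc hraw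
    obtain ⟨a, b, rfl, hab⟩ := hraw _ (List.mem_cons_self)
    simp only [List.foldl_cons]
    rw [pvSortEdges_insertBy acc a b hab hacc]
    exact ih _ (fun e he => by
        rw [PySem.List.mem_insertBy] at he
        rcases he with rfl | he
        · exact ⟨a, b, rfl, hab⟩
        · exact hacc e he)
      (fun e he => hraw e (List.mem_cons_of_mem _ he))

lemma pvStepsB_edges (fuel : Nat) : ∀ cs cnt ptr pending,
    ∀ e ∈ (pvStepsB fuel cs cnt ptr pending).2.2.2, pvIsEdge e := by
  intro cs
  induction cs with
  | nil => intro cnt ptr pending e he; simp [pvStepsB] at he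
  | cons v vs ih =>
    intro cnt ptr pending e he
    simp only [pvStepsB, List.mem_cons] at he
    rcases he with rfl | he
    · set L := (match pending with
        | none => ((pvNextLeaf cnt ptr fuel : Int), pvNextLeaf cnt ptr fuel + 1)
        | some l => (l, ptr) : Int × Int).1 with hL
      by_cases h : v < L
      · exact ⟨v, L, by simp [h], le_of_lt h⟩
      · exact ⟨L, v, by simp [h], by omega⟩
    · exact ih _ _ _ e he
def pvInv (n : Nat) (cs L1 L2 : List Int) (cnt : PySem.Dict Int Int) (ptr : Int) (pending : Option Int) : Prop :=
  (∀ v, PySem.Dict.getD cnt v 0 = (cs.count v : Int)) ∧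
  (∀ v : Int, L1.count v = cs.count v) ∧
  L2.Pairwise (· < ·) ∧
  (∀ x : Int, x ∈ L2 ↔ 1 ≤ x ∧ x ≤ (n : Int) ∧ (ptr ≤ x ∨ 0 < cs.count x ∨ pending = some x)) ∧
  (∀ l, pending = some l → cs.count l = 0 ∧ 1 ≤ l ∧ l < ptr) ∧
  1 ≤ ptr ∧
  L2.length = cs.length + 2 ∧
  cs.length + 2 ≤ n ∧
  ptr ≤ (n : Int) + 1

lemma pvCnt_foldl (xs : List Int) : ∀ (d : PySem.Dict Int Int) (v : Int),
    PySem.Dict.getD (xs.foldl (fun d v => PySem.Dict.insert d v (PySem.Dict.getD d v 0 + 1)) d) v 0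
      = PySem.Dict.getD d v 0 + (xs.count v : Int) := by
  induction xs with
  | nil => intro d v; simp
  | cons x xs ih =>
    intro d v
    simp only [List.foldl_cons, ih, PySem.Dict.getD_insert, List.count_cons]
    by_cases h : v = x
    · subst h; simp; ring
    · simp [h]; omega

lemma pvInv_init (code : List Int) :
    pvInv (code.length + 2) code code
      ((PySem.List.pyRange 0 ((code.length : Int) + 2) 1).foldl (fun l i => l ++ [i + 1]) [])
      (code.foldl (fun d v => PySem.Dict.insert d v (PySem.Dict.getD d v 0 + 1)) ∅) 1 none := by
  have hmap : ((PySem.List.pyRange 0 ((code.length : Int) + 2) 1).foldl (fun l i => l ++ [i + 1]) [])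
      = (PySem.List.pyRange 0 ((code.length : Int) + 2) 1).map (fun i => i + 1) := by
    simpa using PySem.List.foldl_append_singleton_eq_map (fun i => i + 1)
      (PySem.List.pyRange 0 ((code.length : Int) + 2) 1) []
  have hlen : (PySem.List.pyRange 0 ((code.length : Int) + 2) 1).length = code.length + 2 := by
    have : ((code.length : Int) + 2) = ((code.length + 2 : Nat) : Int) := by push_cast; ring
    rw [this, PySem.List.pyRange_zero_natCast]; simp
  refine ⟨?_, fun v => rfl, ?_, ?_, by simp, le_refl 1, ?_, le_refl _, by push_cast; omega⟩
  · intro v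
    have h0 : PySem.Dict.getD (∅ : PySem.Dict Int Int) v 0 = 0 := by rfl
    rw [pvCnt_foldl, h0, zero_add]
  · rw [hmap]
    exact (PySem.List.pairwise_lt_pyRange_one _ _).map _ (fun hab => by omega)
  · intro x
    rw [hmap]
    simp only [List.mem_map, PySem.List.mem_pyRange_one]
    constructor
    · rintro ⟨i, ⟨h1, h2⟩, rfl⟩; push_cast; omega
    · intro ⟨h1, h2, _⟩; exact ⟨x - 1, by omega, by ring⟩
  · rw [hmap, List.length_map, hlen]
lemma pvNodup_subset_length (l l' : List Int) (h : l.Nodup) (hs : l ⊆ l') : l.length ≤ l'.length := by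
  calc l.length = l.toFinset.card := by rw [List.toFinset_card_of_nodup h]
  _ ≤ l'.toFinset.card := Finset.card_le_card (by intro x hx; simp at hx ⊢; exact hs hx)
  _ ≤ l'.length := l'.toFinset_card_le

lemma pvMinFree (cs L2 : List Int) (hpw : L2.Pairwise (· < ·)) (hbig : cs.length < L2.length) :
    ∃ y ∈ L2, cs.count y = 0 ∧ ∀ x ∈ L2, cs.count x = 0 → y ≤ x := by
  have hnd : L2.Nodup := hpw.imp (fun hab => by omega)
  set Z := L2.filter (fun x => decide (cs.count x = 0)) with hZ
  have hZne : Z ≠ [] := by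
    intro hemp
    have hall : ∀ x ∈ L2, 0 < cs.count x := by
      intro x hx
      by_contra h0
      have hxZ : x ∈ Z := List.mem_filter.mpr ⟨hx, by simp; omega⟩
      simp [hemp] at hxZ
    have hsub : L2 ⊆ cs := fun x hx => List.count_pos_iff.mp (hall x hx)
    have := pvNodup_subset_length L2 cs hnd hsub
    omega
  refine ⟨Z.head hZne, ?_, ?_, ?_⟩
  · exact List.mem_of_mem_filter (Z.head_mem hZne)
  · have := List.of_mem_filter (Z.head_mem hZne); simpa using this
  · intro x hx hx0
    have hxZ : x ∈ Z := List.mem_filter.mpr ⟨hx, by simp [hx0]⟩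
    have hpwZ : Z.Pairwise (· < ·) := hpw.filter _
    have hxZ' : x ∈ Z.head hZne :: Z.tail := by rw [List.cons_head_tail hZne]; exact hxZ
    have hpwZ' : (Z.head hZne :: Z.tail).Pairwise (· < ·) := by rw [List.cons_head_tail hZne]; exact hpwZ
    rw [List.mem_cons] at hxZ'
    rcases hxZ' with h | h
    · omega
    · have := (List.pairwise_cons.mp hpwZ').1 x h
      omega
lemma pvInv_step (n : Nat) (c cur ptr2 : Int) (cs L1 L2 : List Int)
    (cnt : PySem.Dict Int Int) (OD : Int → Prop)
    (hcnt : ∀ v, PySem.Dict.getD cnt v 0 = ((c :: cs).count v : Int))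
    (hL1 : ∀ v : Int, L1.count v = (c :: cs).count v)
    (hpw : L2.Pairwise (· < ·))
    (hmem : ∀ x : Int, x ∈ L2 ↔ 1 ≤ x ∧ x ≤ (n : Int) ∧ OD x)
    (hlen : L2.length = (c :: cs).length + 2)
    (hn : (c :: cs).length + 2 ≤ n)
    (hptr2 : 1 ≤ ptr2) (hptr2n : ptr2 ≤ (n : Int) + 1)
    (hcur_mem : cur ∈ L2) (hcur0 : (c :: cs).count cur = 0) (hcurlt : cur < ptr2)
    (hF2 : ∀ x ∈ L2, x ≠ cur → OD x → (ptr2 ≤ x ∨ 0 < (c :: cs).count x))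
    (hODptr : ∀ x : Int, ptr2 ≤ x → OD x)
    (hODcount : ∀ x : Int, 0 < (c :: cs).count x → OD x) :
    pvInv n cs (L1.erase c) (L2.erase cur)
      (PySem.Dict.insert cnt c (PySem.Dict.getD cnt c 0 - 1)) ptr2
      (if PySem.Dict.getD (PySem.Dict.insert cnt c (PySem.Dict.getD cnt c 0 - 1)) c 0 = 0 ∧ 1 ≤ c ∧ c < ptr2
        then some c else none) := by
  have hnd : L2.Nodup := hpw.imp (fun hab => by omega)
  have hcself : List.count c (c :: cs) = List.count c cs + 1 := List.count_cons_self
  have hcc : 0 < (c :: cs).count c := by omega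
  have hccur : c ≠ cur := by
    intro h; subst h; omega
  have hcnt' : ∀ v, PySem.Dict.getD (PySem.Dict.insert cnt c (PySem.Dict.getD cnt c 0 - 1)) v 0
      = (cs.count v : Int) := by
    intro v
    rw [PySem.Dict.getD_insert]
    by_cases h : v = c
    · subst h
      rw [if_pos rfl, hcnt, hcself]
      push_cast; ring
    · rw [if_neg h, hcnt, List.count_cons_of_ne (by omega)]
  have hpend' : (if PySem.Dict.getD (PySem.Dict.insert cnt c (PySem.Dict.getD cnt c 0 - 1)) c 0 = 0 ∧ 1 ≤ c ∧ c < ptr2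
        then some c else none)
      = (if (cs.count c : Int) = 0 ∧ 1 ≤ c ∧ c < ptr2 then some c else none) := by
    rw [hcnt' c]
  have hmono : ∀ x : Int, cs.count x ≤ (c :: cs).count x := by
    intro x
    by_cases h : x = c
    · subst h; omega
    · rw [List.count_cons_of_ne (by omega)]
  rw [hpend']
  refine ⟨hcnt', ?_, hpw.sublist (List.erase_sublist ..), ?_, ?_, hptr2, ?_, by simp only [List.length_cons] at hn; omega, hptr2n⟩
  · -- counts of L1.erase c
    intro v
    by_cases h : v = c
    · subst h
      rw [List.count_erase_self, hL1]
      omega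
    · rw [List.count_erase_of_ne h, hL1, List.count_cons_of_ne (by omega)]
  · -- membership
    intro x
    rw [hnd.mem_erase_iff]
    constructor
    · rintro ⟨hxc, hxm⟩
      obtain ⟨hb1, hb2, hod⟩ := (hmem x).mp hxm
      refine ⟨hb1, hb2, ?_⟩
      rcases hF2 x hxm hxc hod with h | h
      · exact Or.inl h
      · by_cases hxceq : x = c
        · have hxc' : cs.count c = cs.count x := by rw [hxceq]
          by_cases hz : 0 < cs.count x
          · exact Or.inr (Or.inl hz)
          · by_cases hlt : x < ptr2
            · refine Or.inr (Or.inr ?_)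
              rw [if_pos ⟨by omega, by omega, by omega⟩]
              exact congrArg some hxceq.symm
            · exact Or.inl (by omega)
        · refine Or.inr (Or.inl ?_)
          rw [List.count_cons_of_ne (by omega)] at h
          exact h
    · rintro ⟨hb1, hb2, hod⟩
      rcases hod with h | h | h
      · exact ⟨fun hh => by omega, (hmem x).mpr ⟨hb1, hb2, hODptr x h⟩⟩
      · have hpos : 0 < (c :: cs).count x := lt_of_lt_of_le h (hmono x)
        exact ⟨fun hh => by rw [hh] at hpos; omega, (hmem x).mpr ⟨hb1, hb2, hODcount x hpos⟩⟩
      · split_ifs at h with hcond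
        · have hcx : c = x := Option.some.inj h
          refine ⟨fun hh => hccur (by rw [hcx]; exact hh), (hmem x).mpr ⟨hb1, hb2, hODcount x ?_⟩⟩
          rw [← hcx]; exact hcc
  · -- pending' facts
    intro l hl
    split_ifs at hl with hcond
    have hcl : c = l := Option.some.inj hl
    exact ⟨by rw [← hcl]; omega, by omega, by omega⟩
  · -- length
    rw [List.length_erase_of_mem hcur_mem, hlen]
    simp
lemma pvSteps_eq (n : Nat) : ∀ cs L1 L2 cnt ptr pending,
    pvInv n cs L1 L2 cnt ptr pending →
    (pvStepsA cs L1 L2).2.2 = (pvStepsB n cs cnt ptr pending).2.2.2 ∧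
    pvInv n [] (pvStepsA cs L1 L2).1 (pvStepsA cs L1 L2).2.1
      (pvStepsB n cs cnt ptr pending).1 (pvStepsB n cs cnt ptr pending).2.1
      (pvStepsB n cs cnt ptr pending).2.2.1 := by
  intro cs
  induction cs with
  | nil => intro L1 L2 cnt ptr pending h; exact ⟨rfl, h⟩
  | cons c cs ih =>
    intro L1 L2 cnt ptr pending h
    obtain ⟨hcnt, hL1, hpw, hmem, hpend, hptr, hlen, hn, hptrn⟩ := h
    have hcself : List.count c (c :: cs) = List.count c cs + 1 := List.count_cons_self
    have hcL1 : c ∈ L1 := List.count_pos_iff.mp (by rw [hL1]; omega)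
    have hrem1 : (PySem.List.remove? L1 c).getD L1 = L1.erase c := by
      rw [PySem.List.remove?_eq_some_erase L1 c hcL1]; rfl
    obtain ⟨a, t, rfl⟩ : ∃ a t, L2 = a :: t := by
      cases L2 with
      | nil => simp at hlen
      | cons a t => exact ⟨a, t, rfl⟩
    have hget0 : PySem.List.pyGetD (a :: t) 0 0 = a := PySem.List.pyGetD_zero_cons a t 0
    have hdrop : (a :: t).drop 1 = t := rfl
    rcases pending with _ | l
    -- pending = none
    · obtain ⟨y, hym, hy0, hymin⟩ := pvMinFree (c :: cs) (a :: t) hpw (by rw [hlen]; omega)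
      obtain ⟨hy1, hy2, hyd⟩ := (hmem y).mp hym
      have hyptr : ptr ≤ y := by
        rcases hyd with h | h | h
        · exact h
        · omega
        · cases h
      have hleaf : pvNextLeaf cnt ptr n = y := by
        apply pvNextLeaf_min cnt y n ptr hyptr (by omega) (by rw [hcnt]; omega)
        intro z hz1 hz2
        rw [hcnt]
        by_cases h0 : (c :: cs).count z = 0
        · exfalso
          have hzm : z ∈ a :: t := (hmem z).mpr ⟨by omega, by omega, Or.inl hz1⟩
          have := hymin z hzm h0
          omega
        · omega
      have hcur : pvWhileFind L1 t a = y := by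
        apply pvWhileFind_min L1 t a y hpw hym (by rw [PySem.List.count_eq, hL1]; exact hy0)
        intro x hx hxy
        by_cases h0 : (c :: cs).count x = 0
        · exfalso; have := hymin x hx h0; omega
        · rw [PySem.List.count_eq, hL1]; omega
      have hcy : c ≠ y := fun hh => by rw [hh] at hcself hy0; omega
      have hymL2 : y ∈ a :: t := hym
      have hrem2 : (PySem.List.remove? (a :: t) y).getD (a :: t) = (a :: t).erase y := by
        rw [PySem.List.remove?_eq_some_erase _ y hymL2]; rfl
      have hinv' := pvInv_step n c y (y + 1) cs L1 (a :: t) cnt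
        (fun x => ptr ≤ x ∨ 0 < (c :: cs).count x ∨ (none : Option Int) = some x)
        hcnt hL1 hpw hmem hlen hn (by omega) (by omega) hym hy0 (by omega)
        (by
          intro x hx hxy hod
          rcases hod with h | h | h
          · by_cases h0 : (c :: cs).count x = 0
            · have := hymin x hx h0; left; omega
            · right; omega
          · exact Or.inr h
          · cases h)
        (fun x hx => Or.inl (by omega))
        (fun x hx => Or.inr (Or.inl hx))
      have hstep := ih (L1.erase c) ((a :: t).erase y)
        (PySem.Dict.insert cnt c (PySem.Dict.getD cnt c 0 - 1)) (y + 1)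
        (if PySem.Dict.getD (PySem.Dict.insert cnt c (PySem.Dict.getD cnt c 0 - 1)) c 0 = 0 ∧ 1 ≤ c ∧ c < y + 1
          then some c else none) hinv'
      have hedge : (if c > y then [y, c] else [c, y]) = (if c < y then [c, y] else [y, c]) := by
        rcases lt_trichotomy c y with h | h | h
        · simp [h, not_lt.mpr (le_of_lt h)]
        · exact absurd h hcy
        · simp [h, not_lt.mpr (le_of_lt h)]
      simp only [pvStepsA, pvStepsB, hget0, hdrop, hcur, hleaf, hrem1, hrem2]
      exact ⟨by rw [hedge, hstep.1], hstep.2⟩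
    -- pending = some l
    · obtain ⟨hl0, hl1, hlptr⟩ := hpend l rfl
      have hlmem : l ∈ a :: t := (hmem l).mpr ⟨hl1, by omega, Or.inr (Or.inr rfl)⟩
      have hcur : pvWhileFind L1 t a = l := by
        apply pvWhileFind_min L1 t a l hpw hlmem (by rw [PySem.List.count_eq, hL1]; exact hl0)
        intro x hx hxl
        rcases ((hmem x).mp hx).2.2 with h | h | h
        · omega
        · rw [PySem.List.count_eq, hL1]; omega
        · exfalso; have : l = x := Option.some.inj h; omega
      have hcself2 : List.count c (c :: cs) = List.count c cs + 1 := hcself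
      have hcl : c ≠ l := fun hh => by rw [hh] at hcself2 hl0; omega
      have hrem2 : (PySem.List.remove? (a :: t) l).getD (a :: t) = (a :: t).erase l := by
        rw [PySem.List.remove?_eq_some_erase _ l hlmem]; rfl
      have hinv' := pvInv_step n c l ptr cs L1 (a :: t) cnt
        (fun x => ptr ≤ x ∨ 0 < (c :: cs).count x ∨ (some l : Option Int) = some x)
        hcnt hL1 hpw hmem hlen hn hptr hptrn hlmem hl0 hlptr
        (by
          intro x hx hxl hod
          rcases hod with h | h | h
          · exact Or.inl h
          · exact Or.inr h
          · exfalso; exact hxl (Option.some.inj h).symm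
          )
        (fun x hx => Or.inl hx)
        (fun x hx => Or.inr (Or.inl hx))
      have hstep := ih (L1.erase c) ((a :: t).erase l)
        (PySem.Dict.insert cnt c (PySem.Dict.getD cnt c 0 - 1)) ptr
        (if PySem.Dict.getD (PySem.Dict.insert cnt c (PySem.Dict.getD cnt c 0 - 1)) c 0 = 0 ∧ 1 ≤ c ∧ c < ptr
          then some c else none) hinv'
      have hedge : (if c > l then [l, c] else [c, l]) = (if c < l then [c, l] else [l, c]) := by
        rcases lt_trichotomy c l with h | h | h
        · simp [h, not_lt.mpr (le_of_lt h)]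
        · exact absurd h hcl
        · simp [h, not_lt.mpr (le_of_lt h)]
      simp only [pvStepsA, pvStepsB, hget0, hdrop, hcur, hrem1, hrem2]
      exact ⟨by rw [hedge, hstep.1], hstep.2⟩
lemma pvFinal (n : Nat) (L1 L2 : List Int) (cnt : PySem.Dict Int Int) (ptr : Int) (pending : Option Int)
    (h : pvInv n [] L1 L2 cnt ptr pending) :
    ∃ u w : Int, u < w ∧ L2 = [u, w] ∧
      (pending = none → pvNextLeaf cnt ptr n = u ∧ pvNextLeaf cnt (pvNextLeaf cnt ptr n + 1) n = w) ∧
      (∀ l : Int, pending = some l → l = u ∧ pvNextLeaf cnt ptr n = w) := by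
  obtain ⟨hcnt, hL1, hpw, hmem, hpend, hptr, hlen, hn, hptrn⟩ := h
  have hcnt0 : ∀ v, PySem.Dict.getD cnt v 0 = 0 := by intro v; rw [hcnt]; simp
  have hscan : ∀ p : Int, pvNextLeaf cnt p n = p := by
    intro p
    exact pvNextLeaf_min cnt p n p le_rfl (by omega) (by rw [hcnt0]; omega)
      (by intro z h1 h2; omega)
  obtain ⟨u, w, rfl⟩ : ∃ u w, L2 = [u, w] := by
    cases L2 with
    | nil => simp at hlen
    | cons u rest =>
      cases rest with
      | nil => simp at hlen
      | cons w rest2 =>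
        cases rest2 with
        | nil => exact ⟨u, w, rfl⟩
        | cons z rest3 => simp at hlen
  have huw : u < w := by
    have := List.pairwise_cons.mp hpw
    exact this.1 w (by simp)
  obtain ⟨hu1, hu2, hud⟩ := (hmem u).mp (by simp)
  obtain ⟨hw1, hw2, hwd⟩ := (hmem w).mp (by simp)
  simp only [List.count_nil] at hud hwd
  rcases pending with _ | l
  · -- pending = none
    have hup : ptr ≤ u := by
      rcases hud with h | h | h
      · exact h
      · omega
      · cases h
    have hwp : ptr ≤ w := by
      rcases hwd with h | h | h
      · exact h
      · omega
      · cases h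
    have hptrm : ptr ∈ ([u, w] : List Int) := (hmem ptr).mpr ⟨hptr, by omega, Or.inl le_rfl⟩
    simp only [List.mem_cons, List.not_mem_nil, or_false] at hptrm
    have huptr : u = ptr := by omega
    have hw' : w = u + 1 := by
      have h1 : u + 1 ≤ w := by omega
      have hm : u + 1 ∈ ([u, w] : List Int) := (hmem (u+1)).mpr ⟨by omega, by omega, Or.inl (by omega)⟩
      simp only [List.mem_cons, List.not_mem_nil, or_false] at hm
      omega
    refine ⟨u, w, huw, rfl, fun _ => ⟨?_, ?_⟩, by simp⟩
    · rw [hscan]; omega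
    · rw [hscan, hscan]; omega
  · -- pending = some l
    obtain ⟨_, hl1, hlptr⟩ := hpend l rfl
    have hlm : l ∈ ([u, w] : List Int) := (hmem l).mpr ⟨hl1, by omega, Or.inr (Or.inr rfl)⟩
    simp only [List.mem_cons, List.not_mem_nil, or_false] at hlm
    have hlu : l = u := by
      rcases hlm with h | h
      · exact h
      · exfalso
        rcases hud with h2 | h2 | h2
        · omega
        · omega
        · have := Option.some.inj h2; omega
    have hwp : ptr ≤ w := by
      rcases hwd with h | h | h
      · exact h
      · omega
      · have := Option.some.inj h; omega
    have hptrm : ptr ∈ ([u, w] : List Int) := (hmem ptr).mpr ⟨hptr, by omega, Or.inl le_rfl⟩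
    simp only [List.mem_cons, List.not_mem_nil, or_false] at hptrm
    have hwptr : w = ptr := by omega
    refine ⟨u, w, huw, rfl, by simp, fun l' hl' => ⟨?_, ?_⟩⟩
    · have := Option.some.inj hl'; omega
    · rw [hscan]; omega

lemma pvAssemble (raw : List (List Int)) (u w : Int) (huw : u < w)
    (hedges : ∀ e ∈ raw, pvIsEdge e) :
    sort_edges (List.foldl sort_edges [] raw) [u, w]
      = PySem.List.sorted (raw ++ [[u, w]]) (fun e => e) := by
  have hall : ∀ e ∈ raw ++ [[u, w]], pvIsEdge e := by
    intro e he
    rw [List.mem_append] at he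
    rcases he with he | he
    · exact hedges e he
    · simp at he; exact ⟨u, w, he, le_of_lt huw⟩
  calc sort_edges (List.foldl sort_edges [] raw) [u, w]
      = List.foldl sort_edges [] (raw ++ [[u, w]]) := by rw [List.foldl_append]; rfl
    _ = List.foldl (fun es e => PySem.List.insertBy (fun p q => decide (p < q)) e es) []
          (raw ++ [[u, w]]) := pvFoldl_sortEdges _ [] (by simp) hall
    _ = PySem.List.sorted (raw ++ [[u, w]]) (fun e => e) :=
        (PySem.List.sorted_eq_foldl_insertBy _ _).symm

theorem pvEquiv (code : List Int) :
    generate_tree_from_prufer_code code = generate_tree_from_prufer_code_alt code := by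
  have hinv0 := pvInv_init code
  obtain ⟨hraw, hinvf⟩ := pvSteps_eq (code.length + 2) code code
    ((PySem.List.pyRange 0 ((code.length : Int) + 2) 1).foldl (fun l i => l ++ [i + 1]) [])
    (code.foldl (fun d v => PySem.Dict.insert d v (PySem.Dict.getD d v 0 + 1)) ∅) 1 none hinv0
  obtain ⟨u, w, huw, hL2f, hnone, hsome⟩ := pvFinal (code.length + 2) _ _ _ _ _ hinvf
  have hedgesB := pvStepsB_edges (code.length + 2) code
    (code.foldl (fun d v => PySem.Dict.insert d v (PySem.Dict.getD d v 0 + 1)) ∅) 1 none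
  simp only [generate_tree_from_prufer_code, generate_tree_from_prufer_code_alt]
  rw [pvMainLoop_eq_stepsA, pvAltLoop_eq_stepsB]
  simp only [hL2f, List.nil_append]
  have hg0 : PySem.List.pyGetD ([u, w] : List Int) 0 0 = u := PySem.List.pyGetD_zero_cons u [w] 0
  have hg1 : PySem.List.pyGetD ([u, w] : List Int) 1 0 = w := pvE1_pair u w
  rw [hg0, hg1, hraw]
  rcases hpd : (pvStepsB (code.length + 2) code
      (code.foldl (fun d v => PySem.Dict.insert d v (PySem.Dict.getD d v 0 + 1)) ∅) 1 none).2.2.1 with _ | l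
  · obtain ⟨hu, hw⟩ := hnone hpd
    rw [hw, hu]
    exact pvAssemble _ u w huw hedgesB
  · obtain ⟨hu, hw⟩ := hsome l hpd
    rw [hw, hu]
    exact pvAssemble _ u w huw hedgesB

-- ===== VERDICT (by name: the statement is the Claim_ definition above) =====
theorem generate_tree_from_prufer_code_spec : Claim_equal_generate_tree_from_prufer_code := by
  intro code _
  unfold Spec_generate_tree_from_prufer_code
  exact pvEquiv code
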